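-- pv_equiv track=rewrite | github.com/LiamK21/GH-bot-Rust | webhook_handler/helper/general.py | retrieve_output_errors
-- ===== SOURCE A (Python) =====
-- def retrieve_output_errors(out: str) -> str:
--     """
--     Retrieves only the linting errors from the linting output.
--
--     Parameters:
--         out (str): The full linting output
--     Returns:
--         str: The linting errors only
--     """
--     idx: int = 0
--     line: str = ""
--     result: list[str] = []
--     out_lines = out.splitlines()
--     while idx < len(out_lines):
--         line = out_lines[idx].strip()
--         if line.startswith("error") and "could not compile" not in line:
--             startIdx = idx
--             # Capture all lines related to this error
--             while idx < len(out_lines) and not out_lines[idx].strip() == "":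
--                 idx += 1
--             result.append("\n".join(out_lines[startIdx:idx]))
--         else:
--             idx += 1
--
--     return "\n\n".join(result)
-- ===== SOURCE B (Python) =====
-- def retrieve_output_errors(out: str) -> str:
--     """
--     Retrieves only the linting errors from the linting output.
--
--     Parameters:
--         out (str): The full linting output
--     Returns:
--         str: The linting errors only
--     """
--     # Split into blank-separated blocks, then scan each block for its first error line.
--     blocks: list[list[str]] = []
--     cur: list[str] = []
--     for line in out.splitlines():
--         if line.strip() == "":
--             if cur:
--                 blocks.append(cur)
--             cur = []
--         else:
--             cur.append(line)
--     if cur: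
--         blocks.append(cur)
--     results: list[str] = []
--     for blk in blocks:
--         for j, l in enumerate(blk):
--             s = l.strip()
--             if s.startswith("error") and "could not compile" not in s:
--                 results.append("\n".join(blk[j:]))
--                 break
--     return "\n\n".join(results)
-- ===== Notes on version B (the rewrite author's own statement) =====
-- stated objective: alternative
-- what changed: Replaced the manual two-pointer while loop (with an inner line-consuming while) by a two-phase decomposition: first group lines into blank-separated blocks with a single fold, then scan each block for its first error line and emit the block suffix from there.
import Mathlib
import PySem

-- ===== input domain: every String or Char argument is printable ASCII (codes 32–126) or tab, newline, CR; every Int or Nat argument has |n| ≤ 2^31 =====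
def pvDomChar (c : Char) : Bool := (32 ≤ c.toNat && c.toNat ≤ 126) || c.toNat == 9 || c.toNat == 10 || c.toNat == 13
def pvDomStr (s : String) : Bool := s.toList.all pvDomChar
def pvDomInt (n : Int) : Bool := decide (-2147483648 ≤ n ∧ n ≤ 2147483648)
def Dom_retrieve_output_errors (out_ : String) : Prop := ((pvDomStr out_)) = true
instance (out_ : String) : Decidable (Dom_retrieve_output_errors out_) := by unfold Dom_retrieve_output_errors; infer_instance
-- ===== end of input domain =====

-- B replaces A's manual two-pointer while loop by a different decomposition: group lines into
-- blank-separated blocks with one fold, then scan each block for its first error line (alternative, same cost).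


-- ===== PORT A =====
-- shared line predicates: a non-blank line, and the error-line test both Pythons spell out
def pvNb (l : String) : Bool := !(PySem.Str.strip l == "")

def pvIsErr (l : String) : Bool :=
  PySem.Str.startswith (PySem.Str.strip l) "error" &&
    !(PySem.Str.isIn "could not compile" (PySem.Str.strip l))

theorem pvNb_of_isErr (l : String) (h : pvIsErr l = true) : pvNb l = true := by
  unfold pvIsErr at h
  have h1 : PySem.Str.startswith (PySem.Str.strip l) "error" = true := by
    revert h; cases PySem.Str.startswith (PySem.Str.strip l) "error" <;> simp
  have hp := (PySem.Chars.startswith_iff _ _).mp (by simpa using h1)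
  unfold pvNb
  simp only [Bool.not_eq_eq_eq_not, Bool.not_true, beq_eq_false_iff_ne, ne_eq]
  intro he
  have : (PySem.Str.strip l).toList = [] := by rw [he]; rfl
  simp only [PySem.Str.toList_strip] at this
  rw [this] at hp
  simp at hp

-- A's outer while loop over out_lines, with the inner "consume until blank" while as takeWhile/dropWhile
def pvGoA : List String → List String
  | [] => []
  | l :: rest =>
    if h : pvIsErr l = true then
      PySem.Str.join "\n" ((l :: rest).takeWhile pvNb) :: pvGoA ((l :: rest).dropWhile pvNb)
    else
      pvGoA rest
termination_by ls => ls.length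
decreasing_by
  · simp [pvNb_of_isErr _ h]
    exact List.length_dropWhile_le _ _
  · simp

def retrieve_output_errors (out_ : String) : String :=
  PySem.Str.join "\n\n" (pvGoA (PySem.Str.splitlines out_))

-- ===== PORT B =====
-- the fold step of Source B's first loop: (blocks, cur) updated per line
def pvStepB (st : List (List String) × List String) (line : String) :
    List (List String) × List String :=
  if PySem.Str.strip line == "" then
    (if st.2 == [] then st.1 else st.1 ++ [st.2], [])
  else
    (st.1, st.2 ++ [line])

-- Source B's second loop body: first error line in the block, emit the block suffix from there
def pvFindErr : List String → Option String
  | [] => none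
  | l :: rest =>
    if pvIsErr l then some (PySem.Str.join "\n" (l :: rest)) else pvFindErr rest

-- the final flush after Source B's first loop ('if cur: blocks.append(cur)')
def pvFinal (st : List (List String) × List String) : List (List String) :=
  if st.2 == [] then st.1 else st.1 ++ [st.2]

def retrieve_output_errors_alt (out_ : String) : String :=
  PySem.Str.join "\n\n"
    ((pvFinal ((PySem.Str.splitlines out_).foldl pvStepB ([], []))).filterMap pvFindErr)

-- ===== PRECONDITION & SPEC =====
def Spec_retrieve_output_errors (out_ : String) (out : String) : Prop := out = retrieve_output_errors_alt out_
instance (out_ : String) (out : String) : Decidable (Spec_retrieve_output_errors out_ out) := by unfold Spec_retrieve_output_errors; infer_instance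

-- ===== CLAIM (what is proved, stated in full; the proofs are below) =====
def Claim_equal_retrieve_output_errors : Prop := ∀ (out_ : String), Dom_retrieve_output_errors out_ → Spec_retrieve_output_errors out_ (retrieve_output_errors out_)

-- ===== LEMMAS AND PROOFS =====

-- blank-separated blocks of a line list, in the recursion shape of A's scan
def pvBlocksRec : List String → List (List String)
  | [] => []
  | l :: rest =>
    if h : pvNb l = true then
      ((l :: rest).takeWhile pvNb) :: pvBlocksRec ((l :: rest).dropWhile pvNb)
    else
      pvBlocksRec rest
termination_by ls => ls.length
decreasing_by
  · simp [h]
    exact List.length_dropWhile_le _ _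
  · simp

-- recursion shape of B's fold (cur pending, final flush included)
def pvConsolidate (cur : List String) : List String → List (List String)
  | [] => if cur == [] then [] else [cur]
  | l :: ls =>
    if PySem.Str.strip l == "" then
      (if cur == [] then [] else [cur]) ++ pvConsolidate [] ls
    else
      pvConsolidate (cur ++ [l]) ls

theorem pvFoldB_eq (ls : List String) :
    ∀ (blocks : List (List String)) (cur : List String),
      pvFinal (ls.foldl pvStepB (blocks, cur)) = blocks ++ pvConsolidate cur ls := by
  induction ls with
  | nil =>
    intro blocks cur
    simp only [List.foldl_nil, pvConsolidate, pvFinal]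
    by_cases h : cur = [] <;> simp [h]
  | cons l ls ih =>
    intro blocks cur
    simp only [List.foldl_cons, pvStepB, pvConsolidate]
    by_cases h : PySem.Str.strip l == ""
    · rw [if_pos h, if_pos h, ih]
      by_cases hc : cur = [] <;> simp [hc]
    · rw [if_neg h, if_neg h, ih]

theorem pvConsolidate_spec (ls : List String) :
    pvConsolidate [] ls = pvBlocksRec ls ∧
      ∀ (cur : List String), cur ≠ [] →
        pvConsolidate cur ls =
          (cur ++ ls.takeWhile pvNb) :: pvBlocksRec (ls.dropWhile pvNb) := by
  induction ls with
  | nil =>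
    refine ⟨by simp [pvConsolidate, pvBlocksRec], ?_⟩
    intro cur hc
    simp [pvConsolidate, pvBlocksRec, hc]
  | cons l ls ih =>
    obtain ⟨ih1, ih2⟩ := ih
    by_cases h : PySem.Str.strip l == ""
    · have hnb : pvNb l = false := by simp [pvNb, h]
      constructor
      · simp only [pvConsolidate, if_pos h]
        simp [ih1, pvBlocksRec, hnb]
      · intro cur hc
        simp only [pvConsolidate, if_pos h]
        simp [hc, ih1, hnb, pvBlocksRec]
    · have hnb : pvNb l = true := by simp [pvNb, h]
      constructor
      · simp only [pvConsolidate, if_neg h, List.nil_append]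
        rw [ih2 [l] (by simp), pvBlocksRec]
        simp [hnb]
      · intro cur hc
        simp only [pvConsolidate, if_neg h]
        rw [ih2 (cur ++ [l]) (by simp)]
        simp [hnb]

theorem pvFilterMap_blocksRec (rest : List String) :
    List.filterMap pvFindErr (pvBlocksRec rest) =
      (pvFindErr (rest.takeWhile pvNb)).toList ++
        List.filterMap pvFindErr (pvBlocksRec (rest.dropWhile pvNb)) := by
  cases rest with
  | nil => simp [pvBlocksRec, pvFindErr]
  | cons r rs =>
    by_cases h : pvNb r = true
    · rw [pvBlocksRec]
      simp only [h, dif_pos]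
      rw [List.filterMap_cons]
      cases hf : pvFindErr ((r :: rs).takeWhile pvNb) <;> simp
    · simp [pvBlocksRec, List.dropWhile_cons, h, pvFindErr]

theorem pvGoA_eq (ls : List String) :
    pvGoA ls = List.filterMap pvFindErr (pvBlocksRec ls) := by
  induction ls using pvGoA.induct with
  | case1 => simp [pvGoA, pvBlocksRec]
  | case2 l rest h ih =>
    have hnb := pvNb_of_isErr l h
    rw [pvGoA]
    simp only [h, dif_pos]
    rw [pvBlocksRec]
    simp only [hnb, dif_pos]
    rw [List.filterMap_cons]
    have htw : (l :: rest).takeWhile pvNb = l :: rest.takeWhile pvNb := by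
      simp [hnb]
    rw [htw, pvFindErr]
    simp only [h, if_pos]
    rw [ih]
  | case3 l rest h ih =>
    rw [pvGoA]
    simp only [h]
    rw [ih]
    by_cases hnb : pvNb l = true
    · rw [pvBlocksRec]
      simp only [hnb, dif_pos]
      rw [List.filterMap_cons]
      have htw : (l :: rest).takeWhile pvNb = l :: rest.takeWhile pvNb := by
        simp [hnb]
      rw [htw, pvFindErr]
      simp only [h]
      rw [pvFilterMap_blocksRec rest]
      cases hf : pvFindErr (rest.takeWhile pvNb) <;> simp [hnb]
    · rw [pvBlocksRec]
      simp [hnb]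

-- ===== VERDICT (by name: the statement is the Claim_ definition above) =====
theorem retrieve_output_errors_spec : Claim_equal_retrieve_output_errors := by
  intro out_ _
  unfold Spec_retrieve_output_errors retrieve_output_errors retrieve_output_errors_alt
  rw [pvFoldB_eq (PySem.Str.splitlines out_) [] []]
  rw [List.nil_append, (pvConsolidate_spec _).1, pvGoA_eq]
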